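-- pv_equiv track=rewrite | github.com/linming879/bird_identification | projekt_eff/data/utils_bird_mapping.py | build_index_to_label
-- ===== SOURCE A (Python) =====
-- from collections import defaultdict
--
-- def build_index_to_label(bird_name_mapping: dict, merge_names: bool = True) -> dict:
--     """
--     构建 index -> bird label 的映射字典。
--
--     参数:
--         bird_name_mapping (dict): 鸟名到索引的映射
--         merge_names (bool): 是否合并多个 bird name 到一个 label（用于合并类别场景）
--
--     返回:
--         dict: index -> bird label（字符串）
--     """
--     reverse_map = defaultdict(list)
--     for name, idx in bird_name_mapping.items():
--         reverse_map[idx].append(name)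
--
--     if merge_names:
--         # 将多个名字拼接（如合并了多个 tit 类）
--         return {idx: " / ".join(sorted(names)) for idx, names in reverse_map.items()}
--     else:
--         # 只取第一个名字（用于非合并场景）
--         return {idx: names[0] for idx, names in reverse_map.items()}
-- ===== SOURCE B (Python) =====
-- def build_index_to_label(bird_name_mapping: dict, merge_names: bool = True) -> dict:
--     # Alternative decomposition: no defaultdict accumulation pass; take the distinct
--     # indices in first-appearance order, and for each one gather its names directly.
--     items = list(bird_name_mapping.items())
--     indices = list(dict.fromkeys(idx for _, idx in items))
--
--     def label(idx):
--         names = [n for n, i in items if i == idx]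
--         return " / ".join(sorted(names)) if merge_names else names[0]
--
--     return {idx: label(idx) for idx in indices}
-- ===== Notes on version B (the rewrite author's own statement) =====
-- stated objective: alternative
-- what changed: Replaces the defaultdict reverse-map accumulation with a direct construction: dedup the index values in first-appearance order (dict.fromkeys) and build each label by filtering the items for that index.
import Mathlib
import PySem

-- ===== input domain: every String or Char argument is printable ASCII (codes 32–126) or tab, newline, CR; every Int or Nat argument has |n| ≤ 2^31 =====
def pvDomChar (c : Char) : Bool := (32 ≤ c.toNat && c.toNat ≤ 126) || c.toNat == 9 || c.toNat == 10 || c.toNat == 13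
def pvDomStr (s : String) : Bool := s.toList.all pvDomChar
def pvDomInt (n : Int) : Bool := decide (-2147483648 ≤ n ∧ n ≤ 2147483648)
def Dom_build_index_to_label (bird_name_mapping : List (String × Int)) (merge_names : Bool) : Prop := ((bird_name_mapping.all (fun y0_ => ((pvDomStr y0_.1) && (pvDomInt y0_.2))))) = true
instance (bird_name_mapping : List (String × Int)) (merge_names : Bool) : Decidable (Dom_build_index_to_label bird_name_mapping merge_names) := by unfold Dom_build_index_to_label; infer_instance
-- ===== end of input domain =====

-- B replaces A's defaultdict reverse-map accumulation by deduplicating the index values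
-- (first-appearance order) and gathering each index's names by a direct filter (objective: alternative).

-- ===== PORT A =====
-- reverse_map = defaultdict(list); for name, idx in items: reverse_map[idx].append(name)
-- then a dict comprehension over reverse_map.items(); names[0] is ported as headD ""
-- (every list in reverse_map is nonempty, so the default is never used).
def build_index_to_label (bird_name_mapping : List (String × Int)) (merge_names : Bool) : List (Int × String) :=
  let reverse_map : PySem.Dict Int (List String) :=
    bird_name_mapping.foldl (fun d p => d.modify p.2 [] (fun ns => ns ++ [p.1])) PySem.Dict.empty
  if merge_names then
    (reverse_map.items.foldl (fun (d : PySem.Dict Int String) p =>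
        d.insert p.1 (PySem.Str.join " / " (PySem.List.sorted p.2 id))) PySem.Dict.empty).items
  else
    (reverse_map.items.foldl (fun (d : PySem.Dict Int String) p =>
        d.insert p.1 (p.2.headD "")) PySem.Dict.empty).items

-- ===== PORT B =====
-- indices = dict.fromkeys of the index values (ordered dedup = PySem.List.dedup);
-- label(idx) filters the items for idx; dict comprehension over indices.
def build_index_to_label_alt (bird_name_mapping : List (String × Int)) (merge_names : Bool) : List (Int × String) :=
  let indices := PySem.List.dedup (bird_name_mapping.map (·.2))
  let label : Int → String := fun idx =>
    let names := (bird_name_mapping.filter (fun q => q.2 == idx)).map (·.1)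
    if merge_names then PySem.Str.join " / " (PySem.List.sorted names id) else names.headD ""
  (indices.foldl (fun (d : PySem.Dict Int String) idx => d.insert idx (label idx)) PySem.Dict.empty).items

-- ===== PRECONDITION & SPEC =====
def Spec_build_index_to_label (bird_name_mapping : List (String × Int)) (merge_names : Bool) (out : List (Int × String)) : Prop := out = build_index_to_label_alt bird_name_mapping merge_names
instance (bird_name_mapping : List (String × Int)) (merge_names : Bool) (out : List (Int × String)) : Decidable (Spec_build_index_to_label bird_name_mapping merge_names out) := by unfold Spec_build_index_to_label; infer_instance

-- ===== CLAIM (what is proved, stated in full; the proofs are below) =====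
def Claim_equal_build_index_to_label : Prop := ∀ (bird_name_mapping : List (String × Int)) (merge_names : Bool), Dom_build_index_to_label bird_name_mapping merge_names → Spec_build_index_to_label bird_name_mapping merge_names (build_index_to_label bird_name_mapping merge_names)

-- ===== LEMMAS AND PROOFS =====

-- A's reverse_map, characterised: its items are the dedup'd indices paired with their filtered names.
theorem reverse_map_items (m : List (String × Int)) :
    (m.foldl (fun d p => d.modify p.2 [] (fun ns => ns ++ [p.1]))
      (PySem.Dict.empty : PySem.Dict Int (List String))).items
    = (PySem.List.dedup (m.map (·.2))).map
        (fun i => (i, (m.filter (fun q => q.2 == i)).map (·.1))) := by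
  have hnd : (m.foldl (fun d p => d.modify p.2 [] (fun ns => ns ++ [p.1]))
      (PySem.Dict.empty : PySem.Dict Int (List String))).keys.Nodup :=
    PySem.Dict.nodup_keys_foldl_modify_key m (fun p => p.2) [] (fun _ p ns => ns ++ [p.1])
      PySem.Dict.empty (by simp [PySem.Dict.keys, PySem.Dict.empty])
  have hkeys : (m.foldl (fun d p => d.modify p.2 [] (fun ns => ns ++ [p.1]))
      (PySem.Dict.empty : PySem.Dict Int (List String))).keys
      = PySem.List.dedup (m.map (·.2)) := by
    have := PySem.Dict.keys_foldl_modify_key m (fun p => p.2) [] (fun _ p ns => ns ++ [p.1])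
      (PySem.Dict.empty : PySem.Dict Int (List String))
    rw [this]
    have he : (PySem.Dict.empty : PySem.Dict Int (List String)).keys = ([] : List Int) := rfl
    rw [he, PySem.Set.update_nil_left, ← PySem.List.dedup_eq_ofList]
  have hget : ∀ i : Int, (m.foldl (fun d p => d.modify p.2 [] (fun ns => ns ++ [p.1]))
      (PySem.Dict.empty : PySem.Dict Int (List String))).getD i []
      = (m.filter (fun q => q.2 == i)).map (·.1) := by
    intro i
    have hswap : m.foldl (fun d p => d.modify p.2 [] (fun ns => ns ++ [p.1]))
        (PySem.Dict.empty : PySem.Dict Int (List String))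
        = (m.map Prod.swap).foldl (fun d p => d.modify p.1 [] (fun ns => ns ++ [p.2]))
            PySem.Dict.empty := by
      rw [List.foldl_map]; rfl
    rw [hswap, PySem.Dict.getD_foldl_modify_append]
    simp [List.filter_map, Function.comp_def, Prod.swap, PySem.Dict.empty, PySem.Dict.getD,
      PySem.Dict.get?]
  rw [PySem.Dict.items_eq_map_keys _ hnd [], hkeys]
  exact List.map_congr_left (fun i _ => by rw [hget i])

-- a fold of inserts over distinct fresh keys is the corresponding map (both ports end in one)
theorem insert_loop_items (ks : List Int) (v : Int → String) (hnd : ks.Nodup) :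
    (ks.foldl (fun (d : PySem.Dict Int String) i => d.insert i (v i)) PySem.Dict.empty).items
    = ks.map (fun i => (i, v i)) := by
  have := PySem.Dict.items_foldl_insert_fresh ks (fun i => i) v
    (PySem.Dict.empty : PySem.Dict Int String) (fun a _ => rfl) (by simpa using hnd)
  simpa using this

-- the common skeleton: A's comprehension over reverse_map.items equals B's comprehension,
-- for any labelling function of the name list
theorem ports_agree (m : List (String × Int)) (lab : List String → String) :
    ((m.foldl (fun d p => d.modify p.2 [] (fun ns => ns ++ [p.1]))
        (PySem.Dict.empty : PySem.Dict Int (List String))).items.foldl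
      (fun (d : PySem.Dict Int String) p => d.insert p.1 (lab p.2)) PySem.Dict.empty).items
    = ((PySem.List.dedup (m.map (·.2))).foldl
        (fun (d : PySem.Dict Int String) i =>
          d.insert i (lab ((m.filter (fun q => q.2 == i)).map (·.1)))) PySem.Dict.empty).items := by
  have hnd : (PySem.List.dedup (m.map (·.2))).Nodup := by
    rw [PySem.List.dedup_eq_ofList]; exact PySem.Set.nodup_ofList _
  rw [reverse_map_items, List.foldl_map,
    insert_loop_items _ (fun i => lab ((m.filter (fun q => q.2 == i)).map (·.1))) hnd]

-- ===== VERDICT (by name: the statement is the Claim_ definition above) =====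
theorem build_index_to_label_spec : Claim_equal_build_index_to_label := by
  intro m merge _
  unfold Spec_build_index_to_label build_index_to_label build_index_to_label_alt
  cases merge with
  | true => simp only [reduceIte]
            exact ports_agree m (fun ns => PySem.Str.join " / " (PySem.List.sorted ns id))
  | false => simp only [Bool.false_eq_true, reduceIte]
             exact ports_agree m (fun ns => ns.headD "")
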